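-- pv_equiv track=rewrite | github.com/VladKha/CodeWars | 6 kyu/Help Mrs Jefferson/solve.py | shortest_arrang
-- ===== SOURCE A (Python) =====
-- def shortest_arrang(n):
--     r = n // 2 + 2
--     a = [i for i in range(r, 0, -1)]
--     for i in range(r):
--         for j in range(r + 1):
--             if sum(a[i:j]) == n:
--                 return a[i:j]
--     return [-1]
-- ===== SOURCE B (Python) =====
-- def shortest_arrang(n):
--     r = n // 2 + 2
--     k = 1
--     while k * (k + 1) // 2 <= n:
--         t = k * (k - 1) // 2
--         if (n - t) % k == 0:
--             s = (n + t) // k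
--             if s <= r:
--                 return list(range(s, s - k, -1))
--         k += 1
--     return [-1]
-- ===== Notes on version B (the rewrite author's own statement) =====
-- stated objective: faster
-- what changed: A materialises the list [r..1] and scans all O(r^2) slice pairs, summing each slice; B solves k*s - k(k-1)/2 = n arithmetically, trying lengths k = 1,2,... and returning the run from s = (n + k(k-1)/2)//k when it is integral and s <= n//2+2, so no list is built and no slice is summed.
-- outside the precondition, e.g. on shortest_arrang(0): A returns [], B returns [-1]
import Mathlib
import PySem

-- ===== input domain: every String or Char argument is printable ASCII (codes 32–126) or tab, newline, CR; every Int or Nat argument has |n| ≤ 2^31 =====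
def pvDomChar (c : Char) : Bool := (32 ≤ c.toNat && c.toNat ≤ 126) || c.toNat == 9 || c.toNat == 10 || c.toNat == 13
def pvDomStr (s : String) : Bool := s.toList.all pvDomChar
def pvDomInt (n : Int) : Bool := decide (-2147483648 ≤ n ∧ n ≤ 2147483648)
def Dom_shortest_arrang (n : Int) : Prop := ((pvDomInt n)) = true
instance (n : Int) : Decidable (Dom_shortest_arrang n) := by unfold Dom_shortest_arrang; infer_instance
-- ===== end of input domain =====

-- B changes the algorithm (arithmetic search over run lengths instead of scanning all slices of [r..1]); a timing run measures it asymptotically faster.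

-- ===== PORT A =====
-- inner 'for j in range(r+1): if sum(a[i:j]) == n: return a[i:j]'
def pvInnerA (n : Int) (a : List Int) (i : Int) : List Int → Option (List Int)
  | [] => none
  | j :: js =>
    if (PySem.List.slice a (some i) (some j)).sum = n then
      some (PySem.List.slice a (some i) (some j))
    else pvInnerA n a i js

-- outer 'for i in range(r)' carrying the early return of the inner loop
def pvOuterA (n : Int) (a : List Int) (r : Int) : List Int → Option (List Int)
  | [] => none
  | i :: is =>
    match pvInnerA n a i (PySem.List.pyRange 0 (r + 1) 1) with
    | some l => some l
    | none => pvOuterA n a r is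

def shortest_arrang (n : Int) : List Int :=
  let r := PySem.Int.floordiv n 2 + 2
  let a := PySem.List.pyRange r 0 (-1)
  match pvOuterA n a r (PySem.List.pyRange 0 r 1) with
  | some l => l
  | none => [-1]

-- ===== PORT B =====
-- k*(k+1) ≥ 2*k - 2, used only for termination of the while-loop below
theorem pvAltLoop_dec (k : Int) : 2 * k - 2 ≤ k * (k + 1) := by nlinarith [sq_nonneg (k - 1)]

-- 'while k*(k+1)//2 <= n: …' from Source B
def pvAltLoop (n r k : Int) : List Int :=
  if hg : PySem.Int.floordiv (k * (k + 1)) 2 ≤ n then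
    if PySem.Int.mod (n - PySem.Int.floordiv (k * (k - 1)) 2) k = 0 then
      if PySem.Int.floordiv (n + PySem.Int.floordiv (k * (k - 1)) 2) k ≤ r then
        PySem.List.pyRange (PySem.Int.floordiv (n + PySem.Int.floordiv (k * (k - 1)) 2) k)
          (PySem.Int.floordiv (n + PySem.Int.floordiv (k * (k - 1)) 2) k - k) (-1)
      else pvAltLoop n r (k + 1)
    else pvAltLoop n r (k + 1)
  else [-1]
termination_by (n + 2 - k).toNat
decreasing_by
  all_goals
    rw [PySem.Int.floordiv_eq_ediv_of_pos (by omega : (0:Int) < 2)] at hg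
    have h2 : (2:Int) * ((k * (k + 1)) / 2) = k * (k + 1) :=
      Int.mul_ediv_cancel' (Int.even_mul_succ_self k).two_dvd
    have := pvAltLoop_dec k
    omega

def shortest_arrang_alt (n : Int) : List Int :=
  let r := PySem.Int.floordiv n 2 + 2
  pvAltLoop n r 1

-- ===== PRECONDITION & SPEC =====
-- Pre_ excludes only n = 0: there A accidentally returns the empty slice a[0:0] = [],
-- while B naturally reports that no (nonempty) arrangement exists; both corner values are defensible.
def Pre_shortest_arrang (n : Int) : Prop := n ≠ 0
instance (n : Int) : Decidable (Pre_shortest_arrang n) := by unfold Pre_shortest_arrang; infer_instance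
def pvWitness_shortest_arrang : Int := 5

def Spec_shortest_arrang (n : Int) (out : List Int) : Prop := out = shortest_arrang_alt n
instance (n : Int) (out : List Int) : Decidable (Spec_shortest_arrang n out) := by unfold Spec_shortest_arrang; infer_instance

-- ===== CLAIM (what is proved, stated in full; the proofs are below) =====
def Claim_equal_shortest_arrang : Prop := ∀ (n : Int), Dom_shortest_arrang n → Pre_shortest_arrang n → Spec_shortest_arrang n (shortest_arrang n)

-- ===== LEMMAS AND PROOFS =====

-- a solution: a descending run of k integers starting at s (ending at s-k+1 ≥ 1, s ≤ r) summing to n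
def pvSol (n r k s : Int) : Prop := 1 ≤ k ∧ k ≤ s ∧ s ≤ r ∧ k * (2 * s - k + 1) = 2 * n

-- twice the sum of the countdown run [s, s-1, …, s-k+1]
theorem pvSum2 (k : Nat) : ∀ (s : Int), 2 * (PySem.List.pyRange s (s - k) (-1)).sum = k * (2 * s - k + 1) := by
  induction k with
  | zero => intro s; simp
  | succ m ih =>
    intro s
    rw [PySem.List.pyRange_neg_one_cons (by push_cast; omega)]
    rw [show s - ((m:Nat)+1:Nat) = (s - 1) - (m:Int) by push_cast; ring]
    rw [List.sum_cons, mul_add, ih (s-1)]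
    push_cast; ring

theorem pvDropRange (m : Nat) : ∀ (a b : Int), (m : Int) ≤ a - b →
    (PySem.List.pyRange a b (-1)).drop m = PySem.List.pyRange (a - m) b (-1) := by
  induction m with
  | zero => intro a b _; simp
  | succ m ih =>
    intro a b h
    rw [PySem.List.pyRange_neg_one_cons (by push_cast at h ⊢; omega)]
    rw [List.drop_succ_cons, ih (a-1) b (by push_cast at h ⊢; omega)]
    rw [show a - ((m:Nat)+1:Nat) = (a - 1) - (m:Int) by push_cast; ring]

theorem pvTakeRange (m : Nat) : ∀ (a b : Int), (m : Int) ≤ a - b →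
    (PySem.List.pyRange a b (-1)).take m = PySem.List.pyRange a (a - m) (-1) := by
  induction m with
  | zero => intro a b _; simp
  | succ m ih =>
    intro a b h
    rw [PySem.List.pyRange_neg_one_cons (show b < a by push_cast at h; omega)]
    rw [List.take_succ_cons, ih (a-1) b (by push_cast at h ⊢; omega)]
    rw [PySem.List.pyRange_neg_one_cons (show a - ((m:Nat)+1:Nat) < a by push_cast; omega)]
    rw [show a - ((m:Nat)+1:Nat) = (a - 1) - (m:Int) by push_cast; ring]

-- a[i:j] of a = [r, …, 1] is the countdown from r-i to r-j+1
theorem pvSlice (r i j : Int) (h0 : 0 ≤ i) (hij : i ≤ j) (hj : j ≤ r) :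
    PySem.List.slice (PySem.List.pyRange r 0 (-1)) (some i) (some j) =
      PySem.List.pyRange (r - i) (r - j) (-1) := by
  rw [PySem.List.slice_toNat _ h0 (by omega)]
  rw [pvDropRange i.toNat r 0 (by omega)]
  rw [pvTakeRange (j.toNat - i.toNat) (r - i.toNat) 0 (by omega)]
  congr 1 <;> omega

theorem pvSliceEmpty (xs : List Int) (i j : Int) (h0 : 0 ≤ j) (hji : j ≤ i) :
    PySem.List.slice xs (some i) (some j) = [] := by
  rw [PySem.List.slice_toNat _ (by omega) h0]
  rw [show j.toNat - i.toNat = 0 by omega]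
  simp

-- a slice summing to n is a solution
theorem pvSliceSol (n r i j : Int) (h0 : 0 ≤ i) (hij : i < j) (hj : j ≤ r)
    (hsum : (PySem.List.slice (PySem.List.pyRange r 0 (-1)) (some i) (some j)).sum = n) :
    pvSol n r (j - i) (r - i) := by
  refine ⟨by omega, by omega, by omega, ?_⟩
  have h := pvSum2 (j - i).toNat (r - i)
  rw [show (r - i) - ((j-i).toNat : Int) = r - j by omega] at h
  rw [pvSlice r i j h0 (by omega) hj] at hsum
  rw [hsum] at h
  rw [show ((j-i).toNat : Int) = j - i by omega] at h
  omega

-- and conversely a solution yields that slice and its sum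
theorem pvSolSlice (n r k s : Int) (h : pvSol n r k s) :
    PySem.List.slice (PySem.List.pyRange r 0 (-1)) (some (r - s)) (some (r - s + k)) =
      PySem.List.pyRange s (s - k) (-1) ∧
    (PySem.List.pyRange s (s - k) (-1)).sum = n := by
  obtain ⟨hk, hks, hsr, heq⟩ := h
  constructor
  · rw [pvSlice r (r - s) (r - s + k) (by omega) (by omega) (by omega)]
    congr 1 <;> ring
  · have h2 := pvSum2 k.toNat s
    rw [show ((k.toNat : Int)) = k by omega] at h2
    omega

-- for a fixed k a solution start is unique
theorem pvUniqueS (n r k s1 s2 : Int) (ha : pvSol n r k s1) (hb : pvSol n r k s2) : s1 = s2 := by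
  obtain ⟨hk, _, _, e1⟩ := ha; obtain ⟨_, _, _, e2⟩ := hb
  nlinarith [sq_nonneg (s1 - s2)]

-- longer runs start lower
theorem pvExchange (n r k1 s1 k2 s2 : Int) (ha : pvSol n r k1 s1) (hb : pvSol n r k2 s2)
    (h12 : k1 < k2) : s2 < s1 := by
  obtain ⟨hk1, hks1, _, e1⟩ := ha
  obtain ⟨hk2, hks2, _, e2⟩ := hb
  by_contra h
  push_neg at h
  have : k1 * (2 * s1 - k1 + 1) < k2 * (2 * s2 - k2 + 1) := by nlinarith
  omega

-- inner loop: skip prefix of failing j, stop at first hit, none when all fail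
theorem pvInnerAppend (n : Int) (a : List Int) (i : Int) (js1 js2 : List Int)
    (h : ∀ j ∈ js1, (PySem.List.slice a (some i) (some j)).sum ≠ n) :
    pvInnerA n a i (js1 ++ js2) = pvInnerA n a i js2 := by
  induction js1 with
  | nil => rfl
  | cons j js ih =>
    rw [List.cons_append, pvInnerA, if_neg (h j (by simp))]
    exact ih (fun j' hj' => h j' (by simp [hj']))

theorem pvInnerNone (n : Int) (a : List Int) (i : Int) (js : List Int)
    (h : ∀ j ∈ js, (PySem.List.slice a (some i) (some j)).sum ≠ n) :
    pvInnerA n a i js = none := by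
  have := pvInnerAppend n a i js [] h
  simpa using this

theorem pvOuterAppend (n : Int) (a : List Int) (r : Int) (is1 is2 : List Int)
    (h : ∀ i ∈ is1, pvInnerA n a i (PySem.List.pyRange 0 (r + 1) 1) = none) :
    pvOuterA n a r (is1 ++ is2) = pvOuterA n a r is2 := by
  induction is1 with
  | nil => rfl
  | cons i is ih =>
    rw [List.cons_append, pvOuterA, h i (by simp)]
    exact ih (fun i' hi' => h i' (by simp [hi']))

theorem pvOuterNone (n : Int) (a : List Int) (r : Int) (is : List Int)
    (h : ∀ i ∈ is, pvInnerA n a i (PySem.List.pyRange 0 (r + 1) 1) = none) :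
    pvOuterA n a r is = none := by
  have := pvOuterAppend n a r is [] h
  simpa using this

-- floor divisions by 2 of the even products k(k-1), k(k+1) are exact
theorem pvTriDown (k : Int) : 2 * PySem.Int.floordiv (k * (k - 1)) 2 = k * (k - 1) := by
  rw [PySem.Int.floordiv_eq_ediv_of_pos (by omega : (0:Int) < 2)]
  rw [show k * (k - 1) = (k - 1) * ((k - 1) + 1) by ring]
  exact Int.mul_ediv_cancel' (Int.even_mul_succ_self (k - 1)).two_dvd

theorem pvTriUp (k : Int) : 2 * PySem.Int.floordiv (k * (k + 1)) 2 = k * (k + 1) := by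
  rw [PySem.Int.floordiv_eq_ediv_of_pos (by omega : (0:Int) < 2)]
  exact Int.mul_ediv_cancel' (Int.even_mul_succ_self k).two_dvd

-- B's three checks at k produce a solution at k
theorem pvChecksSol (n r k : Int) (hk : 1 ≤ k)
    (h1 : PySem.Int.floordiv (k * (k + 1)) 2 ≤ n)
    (h2 : PySem.Int.mod (n - PySem.Int.floordiv (k * (k - 1)) 2) k = 0)
    (h3 : PySem.Int.floordiv (n + PySem.Int.floordiv (k * (k - 1)) 2) k ≤ r) :
    pvSol n r k (PySem.Int.floordiv (n + PySem.Int.floordiv (k * (k - 1)) 2) k) := by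
  set t := PySem.Int.floordiv (k * (k - 1)) 2 with hts
  have ht : 2 * t = k * (k - 1) := pvTriDown k
  have htri : 2 * PySem.Int.floordiv (k * (k + 1)) 2 = k * (k + 1) := pvTriUp k
  have hdvd : k ∣ (n - t) := (PySem.Int.mod_eq_zero_iff_dvd _ _).mp h2
  have hdvd2 : k ∣ (n + t) := by
    have he : n + t = (n - t) + k * (k - 1) := by omega
    rw [he]; exact dvd_add hdvd ⟨k - 1, rfl⟩
  set s := PySem.Int.floordiv (n + t) k with hss
  have hks : k * s = n + t := by
    rw [hss, PySem.Int.floordiv_eq_ediv_of_pos (by omega : (0:Int) < k)]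
    exact Int.mul_ediv_cancel' hdvd2
  have hkk : k * k ≤ k * s := by
    have e1 : k * (k + 1) = k * k + k := by ring
    have e3 : k * (k - 1) = k * k - k := by ring
    omega
  have hsk : k ≤ s := le_of_mul_le_mul_left hkk (by omega)
  refine ⟨hk, hsk, h3, ?_⟩
  have e2 : k * (2 * s - k + 1) = 2 * (k * s) - k * k + k := by ring
  have e3 : k * (k - 1) = k * k - k := by ring
  omega

-- and conversely a solution at k passes B's checks with that start
theorem pvSolChecks (n r k s : Int) (h : pvSol n r k s) :
    PySem.Int.floordiv (k * (k + 1)) 2 ≤ n ∧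
    PySem.Int.mod (n - PySem.Int.floordiv (k * (k - 1)) 2) k = 0 ∧
    PySem.Int.floordiv (n + PySem.Int.floordiv (k * (k - 1)) 2) k = s := by
  obtain ⟨hk, hsk, hsr, heq⟩ := h
  set t := PySem.Int.floordiv (k * (k - 1)) 2 with hts
  have ht : 2 * t = k * (k - 1) := pvTriDown k
  have htri : 2 * PySem.Int.floordiv (k * (k + 1)) 2 = k * (k + 1) := pvTriUp k
  have e2 : k * (2 * s - k + 1) = 2 * (k * s) - k * k + k := by ring
  have e3 : k * (k - 1) = k * k - k := by ring
  have hks : k * s = n + t := by omega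
  have hkk : k * k ≤ k * s := mul_le_mul_of_nonneg_left hsk (by omega)
  have e1 : k * (k + 1) = k * k + k := by ring
  refine ⟨by omega, ?_, ?_⟩
  · apply (PySem.Int.mod_eq_zero_iff_dvd _ _).mpr
    refine ⟨s - k + 1, ?_⟩
    have e4 : k * (s - k + 1) = k * s - k * k + k := by ring
    omega
  · rw [PySem.Int.floordiv_eq_ediv_of_pos (by omega : (0:Int) < k)]
    rw [show n + t = k * s by omega]
    exact Int.mul_ediv_cancel_left s (by omega)

-- one unfolding of B's while-loop
theorem pvAltLoopUnfold (n r k : Int) : pvAltLoop n r k =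
    if PySem.Int.floordiv (k * (k + 1)) 2 ≤ n then
      if PySem.Int.mod (n - PySem.Int.floordiv (k * (k - 1)) 2) k = 0 then
        if PySem.Int.floordiv (n + PySem.Int.floordiv (k * (k - 1)) 2) k ≤ r then
          PySem.List.pyRange (PySem.Int.floordiv (n + PySem.Int.floordiv (k * (k - 1)) 2) k)
            (PySem.Int.floordiv (n + PySem.Int.floordiv (k * (k - 1)) 2) k - k) (-1)
        else pvAltLoop n r (k + 1)
      else pvAltLoop n r (k + 1)
    else [-1] := by
  rw [pvAltLoop]
  split_ifs <;> rfl

-- the triangle guard is monotone in k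
theorem pvTriMono (k km n : Int) (hk : 1 ≤ k) (hkm : k ≤ km)
    (h : PySem.Int.floordiv (km * (km + 1)) 2 ≤ n) :
    PySem.Int.floordiv (k * (k + 1)) 2 ≤ n := by
  have h1 := pvTriUp k
  have h2 := pvTriUp km
  nlinarith

-- B's loop when no length ≥ k0 works
theorem pvAltLoopNone (n r k0 : Int) (hk : 1 ≤ k0)
    (h : ∀ k s, k0 ≤ k → ¬ pvSol n r k s) : pvAltLoop n r k0 = [-1] := by
  induction k0 using pvAltLoop.induct n r with
  | case1 k hg hm hs =>
    exact absurd (pvChecksSol n r k hk hg hm hs) (h k _ le_rfl)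
  | case2 k hg hm hs ih =>
    rw [pvAltLoopUnfold, if_pos hg, if_pos hm, if_neg hs]
    exact ih (by omega) (fun k' s' hk' => h k' s' (by omega))
  | case3 k hg hm ih =>
    rw [pvAltLoopUnfold, if_pos hg, if_neg hm]
    exact ih (by omega) (fun k' s' hk' => h k' s' (by omega))
  | case4 k hg =>
    rw [pvAltLoopUnfold, if_neg hg]

-- B's loop finds the minimal-length solution
theorem pvAltLoopFound (n r km sm : Int) (hsol : pvSol n r km sm)
    (hmin : ∀ k s, pvSol n r k s → km ≤ k)
    (k0 : Int) (hk : 1 ≤ k0) (hkm : k0 ≤ km) :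
    pvAltLoop n r k0 = PySem.List.pyRange sm (sm - km) (-1) := by
  induction k0 using pvAltLoop.induct n r with
  | case1 k hg hm hs =>
    have hsolk := pvChecksSol n r k hk hg hm hs
    have hke : k = km := le_antisymm hkm (hmin _ _ hsolk)
    subst hke
    have hse : PySem.Int.floordiv (n + PySem.Int.floordiv (k * (k - 1)) 2) k = sm :=
      pvUniqueS n r k _ sm hsolk hsol
    rw [pvAltLoopUnfold, if_pos hg, if_pos hm, if_pos hs, hse]
  | case2 k hg hm hs ih =>
    have hne : k ≠ km := by
      intro hke; subst hke
      obtain ⟨_, _, h3⟩ := pvSolChecks n r k sm hsol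
      exact hs (by rw [h3]; exact hsol.2.2.1)
    rw [pvAltLoopUnfold, if_pos hg, if_pos hm, if_neg hs]
    exact ih (by omega) (by omega)
  | case3 k hg hm ih =>
    have hne : k ≠ km := by
      intro hke; subst hke
      obtain ⟨_, h2, _⟩ := pvSolChecks n r k sm hsol
      exact hm h2
    rw [pvAltLoopUnfold, if_pos hg, if_neg hm]
    exact ih (by omega) (by omega)
  | case4 k hg =>
    exact absurd (pvTriMono k km n hk hkm (pvSolChecks n r km sm hsol).1) hg

-- a minimal-length solution exists when any does
theorem pvExistsMinAux (n r : Int) : ∀ (m : Nat), ∀ (k s : Int), k.toNat ≤ m → pvSol n r k s →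
    ∃ km sm, pvSol n r km sm ∧ ∀ k' s', pvSol n r k' s' → km ≤ k' := by
  intro m
  induction m with
  | zero => intro k s hm hsol; exact absurd hsol.1 (by omega)
  | succ m ih =>
    intro k s hm hsol
    by_cases hex : ∃ k' s', pvSol n r k' s' ∧ k' < k
    · obtain ⟨k', s', h', hlt⟩ := hex
      exact ih k' s' (by have := h'.1; omega) h'
    · refine ⟨k, s, hsol, fun k' s' h' => ?_⟩
      by_contra hc
      exact hex ⟨k', s', h', by omega⟩

theorem pvExistsMin (n r : Int) (h : ∃ k s, pvSol n r k s) :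
    ∃ km sm, pvSol n r km sm ∧ ∀ k s, pvSol n r k s → km ≤ k := by
  obtain ⟨k, s, hsol⟩ := h
  exact pvExistsMinAux n r k.toNat k s le_rfl hsol

-- a slice that cannot be a solution does not sum to n
theorem pvNoHit (n r i j : Int) (hn : n ≠ 0) (hi : 0 ≤ i) (hj0 : 0 ≤ j) (hjr : j ≤ r)
    (h : ¬ pvSol n r (j - i) (r - i)) :
    (PySem.List.slice (PySem.List.pyRange r 0 (-1)) (some i) (some j)).sum ≠ n := by
  by_cases hji : j ≤ i
  · rw [pvSliceEmpty _ i j hj0 hji]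
    simpa using fun he => hn he.symm
  · intro hs
    exact h (pvSliceSol n r i j hi (by omega) hjr hs)

theorem pvInnerNoneAt (n r i : Int) (hn : n ≠ 0) (hi : 0 ≤ i)
    (h : ∀ k, ¬ pvSol n r k (r - i)) :
    pvInnerA n (PySem.List.pyRange r 0 (-1)) i (PySem.List.pyRange 0 (r + 1) 1) = none := by
  apply pvInnerNone
  intro j hj
  rw [PySem.List.mem_pyRange_one] at hj
  exact pvNoHit n r i j hn hi hj.1 (by omega) (h (j - i))

-- both programs with the let-bound r spelled out
theorem pvAUnfold (n : Int) : shortest_arrang n =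
    (match pvOuterA n (PySem.List.pyRange (PySem.Int.floordiv n 2 + 2) 0 (-1))
        (PySem.Int.floordiv n 2 + 2)
        (PySem.List.pyRange 0 (PySem.Int.floordiv n 2 + 2) 1) with
     | some l => l
     | none => [-1]) := rfl

theorem pvBUnfold (n : Int) : shortest_arrang_alt n = pvAltLoop n (PySem.Int.floordiv n 2 + 2) 1 := rfl

theorem pvMain : ∀ (n : Int), n ≠ 0 → shortest_arrang n = shortest_arrang_alt n := by
  intro n hn
  rw [pvAUnfold, pvBUnfold]
  set r := PySem.Int.floordiv n 2 + 2 with hr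
  by_cases hex : ∃ k s, pvSol n r k s
  · obtain ⟨km, sm, hsol, hmin⟩ := pvExistsMin n r hex
    have hk1 : 1 ≤ km := hsol.1
    have hks : km ≤ sm := hsol.2.1
    have hsr : sm ≤ r := hsol.2.2.1
    -- A's outer loop: every i before r - sm fails, i = r - sm hits
    rw [PySem.List.pyRange_one_append 0 (r - sm) r (by omega) (by omega)]
    rw [pvOuterAppend _ _ _ _ _ ?hpre]
    case hpre =>
      intro i hi
      rw [PySem.List.mem_pyRange_one] at hi
      apply pvInnerNoneAt n r i hn hi.1
      intro k hsolk
      have hge := hmin k _ hsolk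
      rcases eq_or_lt_of_le hge with hke | hlt
      · subst hke
        have := pvUniqueS n r km sm (r - i) hsol hsolk
        omega
      · have := pvExchange n r km sm k (r - i) hsol hsolk hlt
        omega
    rw [PySem.List.pyRange_one_cons (show r - sm < r by omega)]
    have hinner : pvInnerA n (PySem.List.pyRange r 0 (-1)) (r - sm)
        (PySem.List.pyRange 0 (r + 1) 1) = some (PySem.List.pyRange sm (sm - km) (-1)) := by
      rw [PySem.List.pyRange_one_append 0 (r - sm + km) (r + 1) (by omega) (by omega)]
      rw [pvInnerAppend _ _ _ _ _ ?hjpre]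
      case hjpre =>
        intro j hj
        rw [PySem.List.mem_pyRange_one] at hj
        apply pvNoHit n r (r - sm) j hn (by omega) hj.1 (by omega)
        intro hsolj
        have := hmin _ _ hsolj
        have hd : j - (r - sm) < km := by omega
        omega
      rw [PySem.List.pyRange_one_cons (show r - sm + km < r + 1 by omega)]
      obtain ⟨hsl, hsum⟩ := pvSolSlice n r km sm hsol
      rw [pvInnerA, if_pos (by rw [hsl]; exact hsum), hsl]
    rw [pvOuterA, hinner]
    exact (pvAltLoopFound n r km sm hsol hmin 1 le_rfl hk1).symm
  · have hnone : ∀ k s, ¬ pvSol n r k s := by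
      intro k s hs; exact hex ⟨k, s, hs⟩
    rw [pvOuterNone _ _ _ _ ?hall]
    case hall =>
      intro i hi
      rw [PySem.List.mem_pyRange_one] at hi
      exact pvInnerNoneAt n r i hn hi.1 (fun k => hnone k (r - i))
    exact (pvAltLoopNone n r 1 le_rfl (fun k s _ => hnone k s)).symm

-- ===== VERDICT (by name: the statement is the Claim_ definition above) =====
theorem shortest_arrang_spec : Claim_equal_shortest_arrang := by
  intro n _ hn
  exact pvMain n hn
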